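-- pv_equiv track=rewrite | github.com/tyroneryu/Algorithm_ps | 백준/Silver/1389. 케빈 베이컨의 6단계 법칙/케빈 베이컨의 6단계 법칙.py | find_min_kevin_bacon
-- ===== SOURCE A (Python) =====
-- def find_min_kevin_bacon(n, dist):
--     min_bacon = float('inf')
--     min_person = -1
--
--     for i in range(n):
--         kevin_bacon = sum(dist[i])
--         if kevin_bacon < min_bacon:
--             min_bacon = kevin_bacon
--             min_person = i + 1
--
--     return min_person
-- ===== SOURCE B (Python) =====
-- def find_min_kevin_bacon(n, dist):
--     order = sorted(range(n), key=lambda i: sum(dist[i]))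
--     return order[0] + 1 if order else -1
-- ===== Notes on version B (the rewrite author's own statement) =====
-- stated objective: alternative
-- what changed: Replaces A's fused running-minimum scan with an inf sentinel by a sort-based selection: stably sort the indices 0..n-1 by row sum and return head+1 (stability gives A's first-minimum tie-break), guarding the empty range with -1.
import Mathlib
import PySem

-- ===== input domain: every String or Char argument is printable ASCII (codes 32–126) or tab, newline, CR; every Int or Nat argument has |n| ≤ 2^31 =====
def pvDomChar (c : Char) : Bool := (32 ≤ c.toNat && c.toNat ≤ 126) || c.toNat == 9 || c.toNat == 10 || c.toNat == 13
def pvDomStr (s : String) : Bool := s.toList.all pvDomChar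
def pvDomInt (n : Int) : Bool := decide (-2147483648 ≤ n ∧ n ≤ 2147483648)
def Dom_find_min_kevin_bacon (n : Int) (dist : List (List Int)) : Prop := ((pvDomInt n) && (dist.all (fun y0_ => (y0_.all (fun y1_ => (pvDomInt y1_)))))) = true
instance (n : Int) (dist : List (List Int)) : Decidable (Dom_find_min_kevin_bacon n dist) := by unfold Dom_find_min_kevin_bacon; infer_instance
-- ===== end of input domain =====

-- B replaces A's running-minimum scan with a stable sort of the indices by row sum
-- followed by taking the head: objective 'alternative' (sort-based selection, same result).

-- ===== PORT A =====
-- min_bacon = float('inf') is modelled as `none` (any int compares < inf, i.e. < none).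
-- dist[i] is pyGetD (exact under Pre_, which guarantees 0 ≤ i < n ≤ len dist).
def find_min_kevin_bacon (n : Int) (dist : List (List Int)) : Int :=
  ((PySem.List.pyRange 0 n 1).foldl
    (fun (st : Option Int × Int) i =>
      let kevin_bacon := (PySem.List.pyGetD dist i []).foldl (· + ·) 0
      match st.1 with
      | none => (some kevin_bacon, i + 1)
      | some mb => if kevin_bacon < mb then (some kevin_bacon, i + 1) else st)
    (none, -1)).2

-- ===== PORT B =====
-- sorted(range(n), key=lambda i: sum(dist[i])) then head (stable sort: smallest index first among ties).
def find_min_kevin_bacon_alt (n : Int) (dist : List (List Int)) : Int :=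
  let order := PySem.List.sorted (PySem.List.pyRange 0 n 1)
    (fun i => (PySem.List.pyGetD dist i []).foldl (· + ·) 0) false
  match order with
  | [] => -1
  | i :: _ => i + 1

-- ===== PRECONDITION & SPEC =====
-- A raises IndexError on dist[i] when n > len(dist); exactly those inputs are excluded.
def Pre_find_min_kevin_bacon (n : Int) (dist : List (List Int)) : Prop :=
  n ≤ (dist.length : Int)
instance (n : Int) (dist : List (List Int)) : Decidable (Pre_find_min_kevin_bacon n dist) := by
  unfold Pre_find_min_kevin_bacon; infer_instance
def pvWitness_find_min_kevin_bacon : Int × List (List Int) := (3, [[0, 1, 2], [1, 0, 1], [2, 1, 0]])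

def Spec_find_min_kevin_bacon (n : Int) (dist : List (List Int)) (out : Int) : Prop := out = find_min_kevin_bacon_alt n dist
instance (n : Int) (dist : List (List Int)) (out : Int) : Decidable (Spec_find_min_kevin_bacon n dist out) := by unfold Spec_find_min_kevin_bacon; infer_instance

-- ===== CLAIM (what is proved, stated in full; the proofs are below) =====
def Claim_equal_find_min_kevin_bacon : Prop := ∀ (n : Int) (dist : List (List Int)), Dom_find_min_kevin_bacon n dist → Pre_find_min_kevin_bacon n dist → Spec_find_min_kevin_bacon n dist (find_min_kevin_bacon n dist)

-- ===== LEMMAS AND PROOFS =====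

-- the common "first index of minimal key" fold both results reduce to
def pvRun (f : Int → Int) (l : List Int) (r : Int) : Int :=
  l.foldl (fun m y => if f y < f m then y else m) r

-- A's loop, once the first iteration has replaced the `inf` sentinel, is pvRun (+1).
theorem pv_a_loop (f : Int → Int) (l : List Int) (r : Int) :
    l.foldl
      (fun (st : Option Int × Int) i =>
        match st.1 with
        | none => (some (f i), i + 1)
        | some mb => if f i < mb then (some (f i), i + 1) else st)
      (some (f r), r + 1) = (some (f (pvRun f l r)), pvRun f l r + 1) := by
  induction l generalizing r with
  | nil => rfl
  | cons y t ih =>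
      simp only [List.foldl_cons, pvRun]
      by_cases h : f y < f r
      · simpa [pvRun, h] using ih y
      · simpa [pvRun, h] using ih r

-- insertion into a nonempty accumulator: the head is the strict running minimum step
theorem pv_insertBy_cons (f : Int → Int) (x h : Int) (t : List Int) :
    PySem.List.insertBy (fun a b => decide (f a < f b)) x (h :: t) =
      if f x < f h then x :: h :: t
      else h :: PySem.List.insertBy (fun a b => decide (f a < f b)) x t := by
  simp [PySem.List.insertBy]

-- the head of the insertion-sort fold is pvRun of the remaining elements
theorem pv_sorted_head (f : Int → Int) (l : List Int) (h : Int) (rest : List Int) :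
    ∃ r, l.foldl
        (fun acc x => PySem.List.insertBy (fun a b => decide (f a < f b)) x acc)
        (h :: rest) = pvRun f l h :: r := by
  induction l generalizing h rest with
  | nil => exact ⟨rest, rfl⟩
  | cons y t ih =>
      simp only [List.foldl_cons, pv_insertBy_cons, pvRun]
      by_cases hy : f y < f h
      · simpa [pvRun, hy] using ih y (h :: rest)
      · simpa [pvRun, hy] using ih h _

-- ===== VERDICT (by name: the statement is the Claim_ definition above) =====
theorem find_min_kevin_bacon_spec : Claim_equal_find_min_kevin_bacon := by
  intro n dist _ _
  unfold Spec_find_min_kevin_bacon find_min_kevin_bacon find_min_kevin_bacon_alt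
  by_cases hn : n ≤ 0
  · rw [PySem.List.pyRange_one_eq_nil hn]
    rfl
  · rw [PySem.List.pyRange_one_cons (show (0:Int) < n by omega)]
    simp only [zero_add]
    -- A side: first iteration consumes the sentinel, then pv_a_loop
    have hA : ((0 :: PySem.List.pyRange 1 n 1).foldl
        (fun (st : Option Int × Int) i =>
          let kevin_bacon := (PySem.List.pyGetD dist i []).foldl (· + ·) 0
          match st.1 with
          | none => (some kevin_bacon, i + 1)
          | some mb => if kevin_bacon < mb then (some kevin_bacon, i + 1) else st)
        (none, -1)).2 =
        pvRun (fun i => (PySem.List.pyGetD dist i []).foldl (· + ·) 0)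
          (PySem.List.pyRange 1 n 1) 0 + 1 := by
      rw [List.foldl_cons]
      show ((PySem.List.pyRange 1 n 1).foldl
        (fun (st : Option Int × Int) i =>
          match st.1 with
          | none => (some ((PySem.List.pyGetD dist i []).foldl (· + ·) 0), i + 1)
          | some mb => if (PySem.List.pyGetD dist i []).foldl (· + ·) 0 < mb
                       then (some ((PySem.List.pyGetD dist i []).foldl (· + ·) 0), i + 1) else st)
        (some ((PySem.List.pyGetD dist (0:Int) []).foldl (· + ·) 0), (0:Int) + 1)).2 = _
      exact congrArg Prod.snd
        (pv_a_loop (fun i => (PySem.List.pyGetD dist i []).foldl (· + ·) 0)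
          (PySem.List.pyRange 1 n 1) 0)
    -- B side: sorted is the fold of insertBy; its head is the same pvRun
    obtain ⟨r, hr⟩ := pv_sorted_head
      (fun i => (PySem.List.pyGetD dist i []).foldl (· + ·) 0)
      (PySem.List.pyRange 1 n 1) 0 []
    have hB : PySem.List.sorted (0 :: PySem.List.pyRange 1 n 1)
        (fun i => (PySem.List.pyGetD dist i []).foldl (· + ·) 0) false =
        pvRun (fun i => (PySem.List.pyGetD dist i []).foldl (· + ·) 0)
          (PySem.List.pyRange 1 n 1) 0 :: r := by
      rw [PySem.List.sorted_eq_foldl_insertBy, List.foldl_cons]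
      exact hr
    rw [hA]
    show _ = (match PySem.List.sorted (0 :: PySem.List.pyRange 1 n 1)
        (fun i => (PySem.List.pyGetD dist i []).foldl (· + ·) 0) false with
      | [] => (-1 : Int)
      | i :: _ => i + 1)
    rw [hB]
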